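-- pv_equiv track=rewrite | github.com/vaishnavimore23/CodingQuestions | test3.py | minimumCycles
-- ===== SOURCE A (Python) =====
-- def minimumCycles(arr):
--     # Calculate the frequency of each number in the array.
--     freq = {}
--     for num in arr:
--         if num not in freq:
--             freq[num] = 0
--         freq[num] += 1
--
--     # The target value is initially set to the maximum value in the array,
--     # but we will check if adjusting the target down can reduce operations.
--     max_val = max(arr)
--
--     # Minimum operations initialized to a high value.
--     min_ops = float("inf")
--
--     # Check each potential target from the minimum value in the array to the maximum.
--     for target in range(min(arr), max_val + 1):
--         current_ops = 0
--         for num, count in freq.items():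
--             if num > target:
--                 # If the current number is already larger than the target, it's not feasible.
--                 current_ops = float("inf")
--                 break
--             diff = target - num
--             # Calculate operations based on the difference.
--             # If diff is odd: one operation will be +1, the rest will be +2.
--             # If diff is even: all operations can be +2.
--             if diff % 3 == 0:
--                 current_ops += (diff // 3) * 2 * count
--             else:
--                 current_ops += ((diff // 3) * 2 + 1) * count
--
--         min_ops = min(min_ops, current_ops)
--
--     return min_ops if min_ops != float("inf") else 0
-- ===== SOURCE B (Python) =====
-- def minimumCycles(arr):
--     # Single pass: the only feasible target is max(arr); add each element's cost directly.
--     max_val = max(arr)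
--     total = 0
--     for num in arr:
--         diff = max_val - num
--         total += (diff // 3) * 2 + (1 if diff % 3 else 0)
--     return total
-- ===== Notes on version B (the rewrite author's own statement) =====
-- stated objective: faster
-- what changed: Drops the frequency dict and the outer scan over every candidate target in range(min,max+1) (all targets below max are infeasible): B computes max(arr) once and sums each element's cost to reach it in one pass.
import Mathlib
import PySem

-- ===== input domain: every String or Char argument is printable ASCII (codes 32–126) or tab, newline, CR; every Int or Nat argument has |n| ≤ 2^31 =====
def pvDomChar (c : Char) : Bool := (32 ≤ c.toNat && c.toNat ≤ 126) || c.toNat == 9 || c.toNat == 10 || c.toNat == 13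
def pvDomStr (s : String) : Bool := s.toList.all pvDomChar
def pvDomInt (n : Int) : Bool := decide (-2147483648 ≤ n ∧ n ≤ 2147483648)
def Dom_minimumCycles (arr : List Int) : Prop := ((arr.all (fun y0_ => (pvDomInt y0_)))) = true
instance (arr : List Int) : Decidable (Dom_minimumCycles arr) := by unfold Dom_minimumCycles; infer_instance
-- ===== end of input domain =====

-- B replaces A's frequency dict plus a scan over every candidate target in range(min,max+1)
-- by a single pass summing each element's cost to reach max(arr), the only feasible target: faster.

-- ===== PORT A =====
-- A mixes float("inf") with int costs via min(); none plays float("inf") here.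
def pyMinInf : Option Int → Option Int → Option Int
  | none, b => b
  | some a, none => some a
  | some a, some b => some (min a b)

-- the inner 'for num, count in freq.items()' loop with its break
def pvInnerA (target : Int) : List (Int × Int) → Int → Option Int
  | [], acc => some acc
  | (num, count) :: rest, acc =>
    if target < num then none
    else
      let diff := target - num
      if PySem.Int.mod diff 3 = 0 then
        pvInnerA target rest (acc + (PySem.Int.floordiv diff 3) * 2 * count)
      else
        pvInnerA target rest (acc + ((PySem.Int.floordiv diff 3) * 2 + 1) * count)

def minimumCycles (arr : List Int) : Int :=
  let freq := arr.foldl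
    (fun d num =>
      let d' := if d.contains num then d else d.insert num (0 : Int)
      d'.insert num (d'.getD num 0 + 1))
    PySem.Dict.empty
  match PySem.List.max? arr (fun y => y), PySem.List.min? arr (fun y => y) with
  | some maxVal, some minVal =>
    let minOps := (PySem.List.pyRange minVal (maxVal + 1) 1).foldl
      (fun acc target => pyMinInf acc (pvInnerA target freq.items 0)) none
    match minOps with
    | some v => v
    | none => 0
  | _, _ => 0      -- unreachable under Pre_: max()/min() raise ValueError on []

-- ===== PORT B =====
def pvCostB (maxVal num : Int) : Int :=
  (PySem.Int.floordiv (maxVal - num) 3) * 2 +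
    (if PySem.Int.mod (maxVal - num) 3 ≠ 0 then 1 else 0)

def minimumCycles_alt (arr : List Int) : Int :=
  match PySem.List.max? arr (fun y => y) with
  | some maxVal => arr.foldl (fun total num => total + pvCostB maxVal num) 0
  | none => 0      -- unreachable under Pre_: max() raises ValueError on []

-- ===== PRECONDITION & SPEC =====
-- Pre_ excludes only the empty list, on which both A and B raise ValueError (max()/min() of empty sequence).
def Pre_minimumCycles (arr : List Int) : Prop := arr ≠ []
instance (arr : List Int) : Decidable (Pre_minimumCycles arr) := by unfold Pre_minimumCycles; infer_instance
def pvWitness_minimumCycles : List Int := [1, 2, 3]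

def Spec_minimumCycles (arr : List Int) (out : Int) : Prop := out = minimumCycles_alt arr
instance (arr : List Int) (out : Int) : Decidable (Spec_minimumCycles arr out) := by unfold Spec_minimumCycles; infer_instance

-- ===== CLAIM (what is proved, stated in full; the proofs are below) =====
def Claim_equal_minimumCycles : Prop := ∀ (arr : List Int), Dom_minimumCycles arr → Pre_minimumCycles arr → Spec_minimumCycles arr (minimumCycles arr)

-- ===== LEMMAS AND PROOFS =====

-- A's dict-building step ('if num not in freq: freq[num] = 0; freq[num] += 1') is the counter loop.
theorem pvFreq_eq_counter (arr : List Int) :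
    arr.foldl
      (fun d num =>
        let d' := if d.contains num then d else d.insert num (0 : Int)
        d'.insert num (d'.getD num 0 + 1))
      PySem.Dict.empty = PySem.Dict.counter arr := by
  rw [← PySem.Dict.foldl_insert_getD_add_one_eq_counter]
  congr 1
  funext d num
  by_cases h : d.contains num
  · simp [h]
  · simp only [h, Bool.false_eq_true, if_false]
    rw [PySem.Dict.getD_insert_self, PySem.Dict.insert_insert_self,
        PySem.Dict.getD_of_not_contains (h := by simpa using h)]

-- the inner loop hits its break as soon as some key exceeds the target
theorem pvInnerA_none (target : Int) (items : List (Int × Int)) (acc : Int)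
    (h : ∃ p ∈ items, target < p.1) : pvInnerA target items acc = none := by
  induction items generalizing acc with
  | nil => simp at h
  | cons p rest ih =>
    obtain ⟨q, hq, hlt⟩ := h
    rcases List.mem_cons.mp hq with hq2 | hq2
    · subst hq2; simp [pvInnerA, hlt]
    · cases p with
      | mk num count =>
        simp only [pvInnerA]
        split_ifs with h1 h2 <;> first | rfl | exact ih _ ⟨q, hq2, hlt⟩

-- with every key ≤ target the inner loop totals per-key cost × count
theorem pvInnerA_some (target : Int) (items : List (Int × Int)) (acc : Int)
    (h : ∀ p ∈ items, p.1 ≤ target) :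
    pvInnerA target items acc =
      some (acc + (items.map (fun p => pvCostB target p.1 * p.2)).sum) := by
  induction items generalizing acc with
  | nil => simp [pvInnerA]
  | cons p rest ih =>
    cases p with
    | mk num count =>
      have hle : num ≤ target := h (num, count) (by simp)
      have hrest : ∀ p ∈ rest, p.1 ≤ target := fun p hp => h p (by simp [hp])
      simp only [pvInnerA, if_neg (by omega : ¬ target < num)]
      by_cases hm : PySem.Int.mod (target - num) 3 = 0
      · rw [if_pos hm, ih _ hrest]
        simp only [List.map_cons, List.sum_cons, pvCostB, hm]
        simp; ring
      · rw [if_neg hm, ih _ hrest]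
        simp only [List.map_cons, List.sum_cons, pvCostB, if_pos hm]
        simp; ring

-- infeasible targets leave min_ops at infinity
theorem pvFold_none (items : List (Int × Int)) (l : List Int)
    (h : ∀ t ∈ l, pvInnerA t items 0 = none) :
    l.foldl (fun acc target => pyMinInf acc (pvInnerA target items 0)) none = none := by
  induction l with
  | nil => rfl
  | cons t rest ih =>
    simp only [List.foldl_cons, h t (by simp), pyMinInf]
    exact ih (fun t ht => h t (by simp [ht]))

-- summing f(k) * count(k) over the distinct keys is summing f over the list
theorem pvSum_count (l keys : List Int) (f : Int → Int) (hnd : keys.Nodup)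
    (hsub : ∀ x ∈ l, x ∈ keys) :
    (keys.map (fun k => f k * (l.count k : Int))).sum = (l.map f).sum := by
  induction l with
  | nil => simp
  | cons x t ih =>
    have hx : x ∈ keys := hsub x (by simp)
    have hsub' : ∀ y ∈ t, y ∈ keys := fun y hy => hsub y (by simp [hy])
    rw [List.map_cons, List.sum_cons, ← ih hsub']
    have key : ∀ (ks : List Int), ks.Nodup → x ∈ ks →
        (ks.map (fun k => f k * ((x :: t).count k : Int))).sum
          = f x + (ks.map (fun k => f k * (t.count k : Int))).sum := by
      intro ks hknd hxk
      induction ks with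
      | nil => simp at hxk
      | cons k ks ihs =>
        rcases List.mem_cons.mp hxk with hk | hk
        · subst hk
          have hnot : x ∉ ks := (List.nodup_cons.mp hknd).1
          have hcnt : ∀ j ∈ ks, (x :: t).count j = t.count j := by
            intro j hj
            have hne : j ≠ x := fun e => hnot (e ▸ hj)
            simp [Ne.symm hne]
          rw [List.map_cons, List.sum_cons, List.map_cons, List.sum_cons]
          rw [List.map_congr_left (fun j hj => by rw [hcnt j hj])]
          simp
          ring
        · have hne : k ≠ x := by
            rintro rfl; exact (List.nodup_cons.mp hknd).1 hk
          rw [List.map_cons, List.sum_cons, List.map_cons, List.sum_cons,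
              ihs (List.nodup_cons.mp hknd).2 hk]
          have hcnt : (x :: t).count k = t.count k := by simp [hne.symm]
          rw [hcnt]
          ring
    rw [key keys hnd hx]

-- ===== VERDICT (by name: the statement is the Claim_ definition above) =====
theorem minimumCycles_spec : Claim_equal_minimumCycles := by
  intro arr _ hpre
  unfold Spec_minimumCycles minimumCycles minimumCycles_alt
  cases hmax : PySem.List.max? arr (fun y => y) with
  | none => exact absurd ((PySem.List.max?_eq_none_iff arr _).mp hmax) hpre
  | some m =>
    cases hmin : PySem.List.min? arr (fun y => y) with
    | none => exact absurd ((PySem.List.min?_eq_none_iff arr _).mp hmin) hpre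
    | some lo =>
      simp only
      rw [pvFreq_eq_counter]
      have hmArr : m ∈ arr := PySem.List.max?_mem hmax
      have hlom : lo ≤ m := PySem.List.min?_isMin hmin m hmArr
      have hitems : (PySem.Dict.counter arr).items
          = (PySem.Set.ofList arr : List Int).map (fun k => (k, (arr.count k : Int))) :=
        PySem.Dict.items_counter arr
      rw [PySem.List.pyRange_one_succ_right hlom, List.foldl_append]
      rw [pvFold_none _ _ (fun t ht => by
        refine pvInnerA_none t _ 0 ⟨(m, (arr.count m : Int)), ?_, ?_⟩
        · rw [hitems]
          exact List.mem_map_of_mem ((PySem.Set.mem_ofList arr m).mpr hmArr)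
        · exact (PySem.List.mem_pyRange_one.mp ht).2)]
      rw [List.foldl_cons, List.foldl_nil]
      rw [pvInnerA_some m _ 0 (fun p hp => by
        rw [hitems] at hp
        obtain ⟨k, hk, rfl⟩ := List.mem_map.mp hp
        exact PySem.List.max?_isMax hmax k ((PySem.Set.mem_ofList arr k).mp hk))]
      simp only [pyMinInf, hitems, List.map_map]
      rw [show ((fun p : Int × Int => pvCostB m p.1 * p.2) ∘ fun k => (k, (arr.count k : Int)))
            = fun k => pvCostB m k * (arr.count k : Int) from rfl]
      rw [pvSum_count arr _ (pvCostB m) (PySem.Set.nodup_ofList arr)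
            (fun x hx => (PySem.Set.mem_ofList arr x).mpr hx)]
      rw [PySem.List.foldl_add arr (pvCostB m) 0]
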